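-- pv_equiv track=rewrite | github.com/sisinflab/Ducho | ducho/multimodal/textual/TextualDataset.py | complex_spit_of_list_of_string
-- ===== SOURCE A (Python) =====
-- def complex_spit_of_list_of_string(sample, splitter):
--     sample_list = []
--     for el in sample:
--         temp = el.split(splitter)
--         for sentence in temp[:-1]:
--             sentence = sentence + splitter
--             sample_list.append(sentence)
--         # now append the last that was excluded in the for each
--         sample_list.append(temp[-1])
--     return sample_list
-- ===== SOURCE B (Python) =====
-- def complex_spit_of_list_of_string(sample, splitter):
--     out = []
--     for el in sample:
--         rest = el
--         while True:
--             if not splitter: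
--                 out.append(rest)
--                 break
--             i = rest.find(splitter)
--             if i < 0:
--                 out.append(rest)
--                 break
--             cut = i + len(splitter)
--             out.append(rest[:cut])
--             rest = rest[cut:]
--     return out
-- ===== Notes on version B (the rewrite author's own statement) =====
-- stated objective: alternative
-- what changed: Replaces split-then-reattach (split each element, loop over all pieces but the last re-appending the splitter, then append the last) by a single forward scan with str.find that cuts each piece directly after the delimiter, so the delimiter is never stripped and re-added.
import Mathlib
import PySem

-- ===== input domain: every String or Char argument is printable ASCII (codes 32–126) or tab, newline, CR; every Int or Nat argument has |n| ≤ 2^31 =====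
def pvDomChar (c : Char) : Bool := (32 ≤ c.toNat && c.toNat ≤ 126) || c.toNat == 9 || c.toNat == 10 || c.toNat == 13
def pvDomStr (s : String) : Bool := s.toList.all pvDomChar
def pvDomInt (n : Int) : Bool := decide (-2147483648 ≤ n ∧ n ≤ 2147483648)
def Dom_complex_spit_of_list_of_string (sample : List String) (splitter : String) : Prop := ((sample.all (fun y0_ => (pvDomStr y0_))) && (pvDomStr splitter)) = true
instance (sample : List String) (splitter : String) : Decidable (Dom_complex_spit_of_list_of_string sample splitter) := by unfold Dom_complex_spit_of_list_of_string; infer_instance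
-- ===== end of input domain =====

-- B replaces A's split-then-reattach pass by a single forward scan with str.find that cuts
-- each piece directly after the delimiter (objective: alternative, same asymptotic cost).

-- ===== PORT A =====
-- literal transliteration of A: split each element, re-append the splitter to all pieces
-- but the last, append the last piece as-is.  split? = none is Python's ValueError on an
-- empty splitter; the branch is unreachable under Pre_ and returns the accumulator.
def complex_spit_of_list_of_string (sample : List String) (splitter : String) : List String :=
  sample.foldl
    (fun sample_list el =>
      match PySem.Str.split? el splitter with
      | none => sample_list
      | some temp =>
        let sample_list :=
          (PySem.List.slice temp none (some (-1))).foldl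
            (fun acc sentence => acc ++ [sentence ++ splitter]) sample_list
        sample_list ++ [(PySem.List.pyGet? temp (-1)).getD ""])
    []

-- ===== PORT B =====
-- the while-True loop of Source B over the remaining suffix `rest` (as code points, the usual
-- Chars level); fuel = |el| + 1 only makes the recursion structural — each iteration with a
-- non-empty splitter consumes at least one character, so the 0 case is never reached.
def complexAltGo (sep : List Char) : Nat → List Char → List (List Char)
  | 0, _ => []
  | fuel + 1, rest =>
    if sep.isEmpty then [rest]
    else
      let i := PySem.Chars.find rest sep
      if i < 0 then [rest]
      else
        let cut : Int := i + (sep.length : Int)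
        PySem.List.slice rest none (some cut) ::
          complexAltGo sep fuel (PySem.List.slice rest (some cut) none)

def complex_spit_of_list_of_string_alt (sample : List String) (splitter : String) : List String :=
  sample.foldl
    (fun out el =>
      out ++ (complexAltGo splitter.toList (el.toList.length + 1) el.toList).map String.ofList)
    []

-- ===== PRECONDITION & SPEC =====
-- Pre_ excludes only the inputs where A raises ValueError: an empty splitter together with
-- a non-empty sample (Python's str.split('') raises; A returns on everything else).
def Pre_complex_spit_of_list_of_string (sample : List String) (splitter : String) : Prop :=
  sample = [] ∨ splitter ≠ ""
instance (sample : List String) (splitter : String) : Decidable (Pre_complex_spit_of_list_of_string sample splitter) := by unfold Pre_complex_spit_of_list_of_string; infer_instance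

def pvWitness_complex_spit_of_list_of_string : List String × String := (["a,b,", "c"], ",")

def Spec_complex_spit_of_list_of_string (sample : List String) (splitter : String) (out : List String) : Prop := out = complex_spit_of_list_of_string_alt sample splitter
instance (sample : List String) (splitter : String) (out : List String) : Decidable (Spec_complex_spit_of_list_of_string sample splitter out) := by unfold Spec_complex_spit_of_list_of_string; infer_instance

-- ===== CLAIM (what is proved, stated in full; the proofs are below) =====
def Claim_equal_complex_spit_of_list_of_string : Prop := ∀ (sample : List String) (splitter : String), Dom_complex_spit_of_list_of_string sample splitter → Pre_complex_spit_of_list_of_string sample splitter → Spec_complex_spit_of_list_of_string sample splitter (complex_spit_of_list_of_string sample splitter)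

-- ===== LEMMAS AND PROOFS =====

-- proof-side mirror of A's split loop: split pieces with `pre` prepended to the first one
def csAux (sep : List Char) (hsep : sep ≠ []) (pre l : List Char) : List (List Char) :=
  match l with
  | [] => [pre]
  | c :: rest =>
    if sep.isPrefixOf (c :: rest) then
      pre :: csAux sep hsep [] ((c :: rest).drop sep.length)
    else
      csAux sep hsep (pre ++ [c]) rest
termination_by l.length
decreasing_by
  · have h1 : 1 ≤ sep.length := List.length_pos_iff.mpr hsep
    simp only [List.length_drop, List.length_cons]
    omega
  · simp

-- append sep to every piece but the last
def csAttach (sep : List Char) : List (List Char) → List (List Char)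
  | [] => []
  | [p] => [p]
  | p :: q :: ps => (p ++ sep) :: csAttach sep (q :: ps)

lemma csAttach_cons (sep p : List Char) (ps : List (List Char)) (h : ps ≠ []) :
    csAttach sep (p :: ps) = (p ++ sep) :: csAttach sep ps := by
  cases ps with
  | nil => exact absurd rfl h
  | cons q qs => rfl

lemma csAttach_append_last (sep : List Char) (qs : List (List Char)) (r : List Char) :
    csAttach sep (qs ++ [r]) = qs.map (· ++ sep) ++ [r] := by
  induction qs with
  | nil => rfl
  | cons q qs ih =>
    rw [List.cons_append, csAttach_cons _ _ _ (by simp), ih]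
    simp

lemma take_add_of_prefix (l sep : List Char) (n : Nat) (h : sep <+: l.drop n) :
    l.take (n + sep.length) = l.take n ++ sep := by
  rw [List.take_add]
  congr 1
  exact (List.prefix_iff_eq_take.mp h).symm

lemma pyGet_concat_neg_one {α : Type} (xs : List α) (x : α) :
    PySem.List.pyGet? (xs ++ [x]) (-1) = some x := by
  simp [PySem.List.pyGet?, PySem.List.pyIdx?]

lemma foldl_snoc_map (splitter : String) (l : List String) (acc : List String) :
    l.foldl (fun a s => a ++ [s ++ splitter]) acc = acc ++ l.map (fun s => s ++ splitter) := by
  induction l generalizing acc <;> simp_all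

lemma csAux_ne_nil (sep : List Char) (hsep : sep ≠ []) (pre l : List Char) :
    csAux sep hsep pre l ≠ [] := by
  fun_induction csAux sep hsep pre l <;> simp_all

lemma go_spec (sep : List Char) (hsep : sep ≠ []) :
    ∀ (fuel : Nat) (l cur : List Char) (acc : List (List Char)), l.length < fuel →
      PySem.Chars.splitOn.go sep fuel l cur acc = acc.reverse ++ csAux sep hsep cur.reverse l := by
  intro fuel
  induction fuel with
  | zero => intro l cur acc h; omega
  | succ fuel ih =>
    intro l cur acc h
    cases l with
    | nil => simp [PySem.Chars.splitOn.go, csAux]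
    | cons c rest =>
      rw [PySem.Chars.splitOn.go]
      have hsl := List.length_pos_iff.mpr hsep
      simp only [List.length_cons] at h
      by_cases hp : sep.isPrefixOf (c :: rest)
      · have hfuel : (List.drop sep.length (c :: rest)).length < fuel := by
          simp only [List.length_drop, List.length_cons]; omega
        rw [if_pos hp, ih _ _ _ hfuel]
        rw [csAux]
        simp [hp]
      · rw [if_neg hp, ih _ _ _ (by simpa using h)]
        rw [csAux]
        simp [hp]

lemma splitOn_eq_csAux (sep : List Char) (hsep : sep ≠ []) (l : List Char) :
    PySem.Chars.splitOn l sep = csAux sep hsep [] l := by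
  have := go_spec sep hsep (l.length + 1) l [] [] (by omega)
  simpa [PySem.Chars.splitOn] using this

-- first occurrence of sep in l at i (as reported by find) splits csAux
lemma csAux_no_occ (sep : List Char) (hsep : sep ≠ []) (pre l : List Char)
    (h : ¬ sep <:+: l) : csAux sep hsep pre l = [pre ++ l] := by
  induction l generalizing pre with
  | nil => simp [csAux]
  | cons c rest ih =>
    rw [csAux]
    have hp : ¬ sep.isPrefixOf (c :: rest) := by
      intro hp
      exact h (List.isPrefixOf_iff_prefix.mp hp).isInfix
    rw [if_neg hp, ih _ (fun hinf => h (hinf.trans (List.suffix_cons c rest).isInfix))]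
    simp

lemma csAux_first_occ (sep : List Char) (hsep : sep ≠ []) :
    ∀ (l pre : List Char) (i : Nat), sep <+: l.drop i → (∀ j < i, ¬ sep <+: l.drop j) →
      csAux sep hsep pre l = (pre ++ l.take i) :: csAux sep hsep [] (l.drop (i + sep.length)) := by
  intro l
  induction l with
  | nil =>
    intro pre i h1 _
    simp only [List.drop_nil] at h1
    exact absurd (List.prefix_nil.mp h1) hsep
  | cons c rest ih =>
    intro pre i h1 h2
    cases i with
    | zero =>
      simp only [List.drop_zero] at h1
      rw [csAux, if_pos (List.isPrefixOf_iff_prefix.mpr h1)]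
      simp
    | succ j =>
      have hp : ¬ sep.isPrefixOf (c :: rest) := by
        intro hp
        exact h2 0 (by omega) (by simpa using List.isPrefixOf_iff_prefix.mp hp)
      rw [csAux, if_neg hp]
      rw [ih (pre ++ [c]) j (by simpa using h1)
        (fun k hk => by simpa using h2 (k + 1) (by omega))]
      have hd : j + 1 + sep.length = (j + sep.length) + 1 := by omega
      rw [hd, List.drop_succ_cons]
      simp

-- B's scan computes csAttach of the split pieces
lemma complexAltGo_eq (sep : List Char) (hsep : sep ≠ []) :
    ∀ (fuel : Nat) (l : List Char), l.length < fuel →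
      complexAltGo sep fuel l = csAttach sep (csAux sep hsep [] l) := by
  intro fuel
  induction fuel with
  | zero => intro l h; omega
  | succ fuel ih =>
    intro l h
    rw [complexAltGo]
    rw [if_neg (by simpa using hsep)]
    by_cases hneg : PySem.Chars.find l sep < 0
    · have hm1 : PySem.Chars.find l sep = -1 :=
        le_antisymm (by omega) (PySem.Chars.neg_one_le_find l sep)
      have hocc : ¬ sep <:+: l := (PySem.Chars.find_eq_neg_one_iff l sep).mp hm1
      rw [if_pos hneg, csAux_no_occ sep hsep [] l hocc]
      rfl
    · push Not at hneg
      obtain ⟨hpre, hfirst⟩ := PySem.Chars.find_spec (s := l) (sub := sep) hneg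
      have hsl : 0 < sep.length := List.length_pos_iff.mpr hsep
      have hl : (PySem.Chars.find l sep).toNat + sep.length ≤ l.length := by
        have h1 := hpre.length_le
        have h2 := PySem.Chars.find_le_length l sep
        simp only [List.length_drop] at h1
        omega
      have hcut : (0:Int) ≤ PySem.Chars.find l sep + (sep.length : Int) := by omega
      have htn : (PySem.Chars.find l sep + (sep.length : Int)).toNat
          = (PySem.Chars.find l sep).toNat + sep.length := by omega
      rw [if_neg (not_lt.mpr hneg)]
      simp only [PySem.List.slice_to _ hcut, PySem.List.slice_from _ hcut, htn]
      rw [csAux_first_occ sep hsep l [] (PySem.Chars.find l sep).toNat hpre hfirst]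
      rw [csAttach_cons _ _ _ (csAux_ne_nil sep hsep [] _)]
      rw [ih _ (by simp only [List.length_drop]; omega)]
      rw [take_add_of_prefix l sep _ hpre]
      simp

-- A's inner loop over the String pieces produces csAttach (mapped to String)
lemma a_inner_eq (splitter : String) (ps : List (List Char)) (hps : ps ≠ []) (acc : List String) :
    ((PySem.List.slice (ps.map String.ofList) none (some (-1))).foldl
        (fun a s => a ++ [s ++ splitter]) acc)
      ++ [(PySem.List.pyGet? (ps.map String.ofList) (-1)).getD ""]
    = acc ++ (csAttach splitter.toList ps).map String.ofList := by
  obtain ⟨qs, r, rfl⟩ : ∃ qs r, ps = qs ++ [r] :=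
    ⟨ps.dropLast, ps.getLast hps, (List.dropLast_append_getLast hps).symm⟩
  rw [PySem.List.slice_to_neg_one]
  simp only [List.map_append, List.map_cons, List.map_nil, List.dropLast_concat]
  rw [pyGet_concat_neg_one, foldl_snoc_map, csAttach_append_last]
  simp [List.map_map, Function.comp_def]

-- per-element agreement, then fold over the sample
lemma per_element (splitter : String) (hs : splitter ≠ "") (el : String) (acc : List String) :
    (match PySem.Str.split? el splitter with
      | none => acc
      | some temp =>
        ((PySem.List.slice temp none (some (-1))).foldl
            (fun a sentence => a ++ [sentence ++ splitter]) acc)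
          ++ [(PySem.List.pyGet? temp (-1)).getD ""])
    = acc ++ (complexAltGo splitter.toList (el.toList.length + 1) el.toList).map String.ofList := by
  have hsep : splitter.toList ≠ [] := fun hh =>
    hs (by have := congrArg String.ofList hh; simpa using this)
  have hsplit : PySem.Str.split? el splitter
      = some ((PySem.Chars.splitOn el.toList splitter.toList).map String.ofList) := by
    simp [PySem.Str.split?, PySem.Chars.split?, hsep]
  rw [hsplit]
  dsimp only
  have hps : (PySem.Chars.splitOn el.toList splitter.toList) ≠ [] := by
    rw [splitOn_eq_csAux _ hsep]
    exact csAux_ne_nil _ hsep _ _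
  rw [a_inner_eq splitter _ hps acc]
  rw [complexAltGo_eq splitter.toList hsep _ _ (by omega), splitOn_eq_csAux _ hsep]

-- ===== VERDICT (by name: the statement is the Claim_ definition above) =====
theorem complex_spit_of_list_of_string_spec : Claim_equal_complex_spit_of_list_of_string := by
  intro sample splitter _ hpre
  unfold Spec_complex_spit_of_list_of_string
  rcases hpre with rfl | hs
  · rfl
  · unfold complex_spit_of_list_of_string complex_spit_of_list_of_string_alt
    exact (List.foldl_ext _ _ [] (fun a b _ => per_element splitter hs b a))
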